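-- pv_equiv track=rewrite | github.com/thu-uav/Multi-UAV-pursuit-evasion | omni_drones/envs/hide_and_seek/placement.py | has_feasible_path
-- ===== SOURCE A (Python) =====
-- def is_valid_move(matrix, row, col, visited):
--     rows, cols = len(matrix), len(matrix[0])
--     return 0 <= row < rows and 0 <= col < cols and matrix[row][col] == 0 and (row, col) not in visited
--
-- def dfs(matrix, start, target, visited):
--     row, col = start
--
--     if start == target:
--         return True
--
--     visited.add((row, col))
--
--     # up, down, left, right
--     directions = [(-1, 0), (1, 0), (0, -1), (0, 1)]
--
--     for dr, dc in directions:
--         new_row, new_col = row + dr, col + dc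
--         if is_valid_move(matrix, new_row, new_col, visited):
--             if dfs(matrix, (new_row, new_col), target, visited):
--                 return True
--
--     return False
--
-- def has_feasible_path(matrix, start_points, target):
--     reached_targets = 0
--     num_threshold = 4
--     for start_point in start_points:
--         visited = set()
--         if dfs(matrix, start_point, target, visited):
--             reached_targets += 1
--             if reached_targets >= num_threshold:
--                 return True
--     return False
-- ===== SOURCE B (Python) =====
-- from collections import deque
--
-- def has_feasible_path(matrix, start_points, target):
--     rows, cols = len(matrix), len(matrix[0])
--
--     def free(r, c):
--         return 0 <= r < rows and 0 <= c < cols and matrix[r][c] == 0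
--
--     # One BFS flood-fill from the target over free cells; each start is then
--     # tested in O(1): it reaches the target iff it IS the target or one of its
--     # four neighbours lies in the target's free-cell component.
--     comp = set()
--     tr, tc = target
--     if free(tr, tc):
--         comp.add((tr, tc))
--         queue = deque([(tr, tc)])
--         while queue:
--             r, c = queue.popleft()
--             for dr, dc in ((-1, 0), (1, 0), (0, -1), (0, 1)):
--                 n = (r + dr, c + dc)
--                 if free(n[0], n[1]) and n not in comp:
--                     comp.add(n)
--                     queue.append(n)
--
--     count = 0
--     for r, c in start_points:
--         if (r, c) == target or any((r + dr, c + dc) in comp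
--                                    for dr, dc in ((-1, 0), (1, 0), (0, -1), (0, 1))):
--             count += 1
--             if count >= 4:
--                 return True
--     return False
-- ===== Notes on version B (the rewrite author's own statement) =====
-- stated objective: alternative
-- what changed: Replaces a fresh recursive DFS from every start point with a single BFS flood-fill of the target's free-cell component, after which each start point is tested by O(1) membership of itself/its four neighbours (not measurably faster on the benchmark distribution).
-- outside the precondition, e.g. on has_feasible_path([], [(0, 0)], (0, 0)): A returns False, B raises IndexError; on has_feasible_path([[0, 0], [1]], [], (0, 0)): A returns False, B raises IndexError
import Mathlib
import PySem

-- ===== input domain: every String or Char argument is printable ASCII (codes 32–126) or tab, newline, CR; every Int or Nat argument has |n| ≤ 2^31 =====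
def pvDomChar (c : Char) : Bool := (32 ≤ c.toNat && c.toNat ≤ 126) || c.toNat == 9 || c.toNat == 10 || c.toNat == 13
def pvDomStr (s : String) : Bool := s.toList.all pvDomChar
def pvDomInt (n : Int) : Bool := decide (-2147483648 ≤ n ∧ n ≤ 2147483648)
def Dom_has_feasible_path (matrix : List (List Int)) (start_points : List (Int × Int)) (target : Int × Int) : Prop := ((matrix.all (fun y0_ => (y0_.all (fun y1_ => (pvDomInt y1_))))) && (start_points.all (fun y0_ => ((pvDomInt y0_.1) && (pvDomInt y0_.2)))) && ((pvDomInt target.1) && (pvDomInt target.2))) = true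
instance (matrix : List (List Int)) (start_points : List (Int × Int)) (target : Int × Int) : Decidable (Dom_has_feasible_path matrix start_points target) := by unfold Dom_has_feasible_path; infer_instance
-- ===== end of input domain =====

-- B replaces A's per-start recursive DFS by ONE BFS flood-fill of the target's free-cell
-- component, then tests each start by membership (objective: alternative algorithm).

-- ===== PORT A =====

-- the four directions (up, down, left, right), as in both Pythons
def pvDirs : List (Int × Int) := [(-1, 0), (1, 0), (0, -1), (0, 1)]

-- is_valid_move(matrix, row, col, visited); on a ragged row Python raises IndexError where
-- the pyGet? lookup yields none (≠ some 0) — exact on Pre_ (rows at least as long as row 0)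
def is_valid_move (matrix : List (List Int)) (row col : Int)
    (visited : PySem.Set (Int × Int)) : Bool :=
  decide (0 ≤ row) && decide (row < (matrix.length : Int)) &&
  decide (0 ≤ col) && decide (col < ((matrix.headD []).length : Int)) &&
  (PySem.List.pyGet? ((PySem.List.pyGet? matrix row).getD []) col == some 0) &&
  !(PySem.Set.contains visited (row, col))

-- dfs(matrix, start, target, visited): visited is threaded (Python mutates it); the Nat fuel
-- only makes the recursion total — has_feasible_path passes fuel rows*cols+1, provably enough
mutual
def dfsA (matrix : List (List Int)) (target : Int × Int) :
    Nat → (Int × Int) → PySem.Set (Int × Int) → Bool × PySem.Set (Int × Int)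
  | 0, _, visited => (false, visited)
  | fuel + 1, start, visited =>
      if start = target then (true, visited)
      else dfsLoop matrix target fuel start.1 start.2 pvDirs (PySem.Set.add visited start)
termination_by fuel _ _ => (fuel, 0)
-- the 'for dr, dc in directions' loop of dfs, with its early return on True
def dfsLoop (matrix : List (List Int)) (target : Int × Int) :
    Nat → Int → Int → List (Int × Int) → PySem.Set (Int × Int) →
    Bool × PySem.Set (Int × Int)
  | _, _, _, [], visited => (false, visited)
  | fuel, row, col, d :: rest, visited =>
      if is_valid_move matrix (row + d.1) (col + d.2) visited then
        match dfsA matrix target fuel (row + d.1, col + d.2) visited with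
        | (true, v') => (true, v')
        | (false, v') => dfsLoop matrix target fuel row col rest v'
      else dfsLoop matrix target fuel row col rest visited
termination_by fuel _ _ ds _ => (fuel, ds.length + 1)
end

-- the main loop: reached_targets counter, num_threshold = 4, early return True
def hfpLoopA (matrix : List (List Int)) (target : Int × Int) (fuel : Nat) :
    List (Int × Int) → Int → Bool
  | [], _ => false
  | s :: rest, reached =>
      if (dfsA matrix target fuel s PySem.Set.empty).1 then
        if reached + 1 ≥ 4 then true else hfpLoopA matrix target fuel rest (reached + 1)
      else hfpLoopA matrix target fuel rest reached

def has_feasible_path (matrix : List (List Int)) (start_points : List (Int × Int))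
    (target : Int × Int) : Bool :=
  hfpLoopA matrix target (matrix.length * (matrix.headD []).length + 1) start_points 0

-- ===== PORT B =====

-- free(r, c) of Source B: in bounds and cell 0 (pyGet? none on a ragged short row = IndexError)
def pvFree (matrix : List (List Int)) (r c : Int) : Bool :=
  decide (0 ≤ r) && decide (r < (matrix.length : Int)) &&
  decide (0 ≤ c) && decide (c < ((matrix.headD []).length : Int)) &&
  (PySem.List.pyGet? ((PySem.List.pyGet? matrix r).getD []) c == some 0)

-- the 'for dr, dc in …' body of the BFS while-loop: enqueue fresh free neighbours of (r, c)
def bfsScan (matrix : List (List Int)) (r c : Int) :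
    List (Int × Int) → List (Int × Int) → PySem.Set (Int × Int) →
    List (Int × Int) × PySem.Set (Int × Int)
  | [], q, comp => (q, comp)
  | d :: rest, q, comp =>
      if pvFree matrix (r + d.1) (c + d.2) &&
         !(PySem.Set.contains comp (r + d.1, c + d.2)) then
        bfsScan matrix r c rest (q ++ [(r + d.1, c + d.2)])
          (PySem.Set.add comp (r + d.1, c + d.2))
      else bfsScan matrix r c rest q comp

-- 'while queue:' — fuel rows*cols bounds the number of pops (each pop was one insertion
-- into comp, and comp only ever holds distinct in-bounds cells), so it is provably enough
def bfsGo (matrix : List (List Int)) :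
    Nat → List (Int × Int) → PySem.Set (Int × Int) → PySem.Set (Int × Int)
  | _, [], comp => comp
  | 0, _ :: _, comp => comp
  | fuel + 1, p :: qs, comp =>
      let s := bfsScan matrix p.1 p.2 pvDirs qs comp
      bfsGo matrix fuel s.1 s.2

-- comp of Source B: the BFS flood fill from target, seeded only if target itself is free
def targetComp (matrix : List (List Int)) (target : Int × Int) : PySem.Set (Int × Int) :=
  if pvFree matrix target.1 target.2 then
    bfsGo matrix (matrix.length * (matrix.headD []).length) [target]
      (PySem.Set.add PySem.Set.empty target)
  else PySem.Set.empty

-- Source B's counting loop over start_points with the same threshold-4 early exit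
def hfpLoopB (target : Int × Int) (comp : PySem.Set (Int × Int)) :
    List (Int × Int) → Int → Bool
  | [], _ => false
  | s :: rest, count =>
      if decide (s = target) ||
         pvDirs.any (fun d => PySem.Set.contains comp (s.1 + d.1, s.2 + d.2)) then
        if count + 1 ≥ 4 then true else hfpLoopB target comp rest (count + 1)
      else hfpLoopB target comp rest count

def has_feasible_path_alt (matrix : List (List Int)) (start_points : List (Int × Int))
    (target : Int × Int) : Bool :=
  hfpLoopB target (targetComp matrix target) start_points 0

-- ===== PRECONDITION & SPEC =====
-- Pre_ excludes the inputs on which Python can raise IndexError: an empty matrix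
-- (len(matrix[0])), and ragged matrices with a reachable "hole" — an in-bounds index
-- (r, c) with c < len(matrix[0]) falling off a short row r that the programs may probe,
-- i.e. that is the target, adjacent to a start point, or adjacent to a free cell.
def Pre_has_feasible_path (matrix : List (List Int)) (start_points : List (Int × Int))
    (target : Int × Int) : Prop :=
  matrix ≠ [] ∧
  ∀ r ∈ List.range matrix.length, ∀ c ∈ List.range (matrix.headD []).length,
    (matrix.getD r []).length ≤ c →
      (((r : Int), (c : Int)) ≠ target ∧
       (∀ s ∈ start_points, ∀ d ∈ pvDirs,
         (s.1 + d.1, s.2 + d.2) ≠ (((r : Int), (c : Int)) : Int × Int)) ∧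
       (∀ d ∈ pvDirs, pvFree matrix ((r : Int) + d.1) ((c : Int) + d.2) = false))
instance (matrix : List (List Int)) (start_points : List (Int × Int)) (target : Int × Int) : Decidable (Pre_has_feasible_path matrix start_points target) := by unfold Pre_has_feasible_path; infer_instance

def pvWitness_has_feasible_path : List (List Int) × (List (Int × Int)) × (Int × Int) :=
  ([[0, 1], [0, 0]], [(0, 0), (1, 1)], (1, 0))

def Spec_has_feasible_path (matrix : List (List Int)) (start_points : List (Int × Int)) (target : Int × Int) (out : Bool) : Prop := out = has_feasible_path_alt matrix start_points target
instance (matrix : List (List Int)) (start_points : List (Int × Int)) (target : Int × Int) (out : Bool) : Decidable (Spec_has_feasible_path matrix start_points target out) := by unfold Spec_has_feasible_path; infer_instance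

-- ===== CLAIM (what is proved, stated in full; the proofs are below) =====
def Claim_equal_has_feasible_path : Prop := ∀ (matrix : List (List Int)) (start_points : List (Int × Int)) (target : Int × Int), Dom_has_feasible_path matrix start_points target → Pre_has_feasible_path matrix start_points target → Spec_has_feasible_path matrix start_points target (has_feasible_path matrix start_points target)

-- ===== LEMMAS AND PROOFS =====

-- `v + d` for a direction d
def pvNb (v d : Int × Int) : Int × Int := (v.1 + d.1, v.2 + d.2)

-- free-cell reachability of the target: v is the target, or v is free and a step closer
inductive pvRF (m : List (List Int)) (t : Int × Int) : Int × Int → Prop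
  | base : pvFree m t.1 t.2 = true → pvRF m t t
  | step (v d : Int × Int) : pvFree m v.1 v.2 = true → d ∈ pvDirs →
      pvRF m t (pvNb v d) → pvRF m t v

lemma pvDirs_neg : ∀ d ∈ pvDirs, ((-d.1, -d.2) : Int × Int) ∈ pvDirs := by decide

lemma pvRF_free {m : List (List Int)} {t v : Int × Int} (h : pvRF m t v) :
    pvFree m v.1 v.2 = true := by cases h <;> assumption

def gridN (m : List (List Int)) : Nat := m.length * (m.headD []).length

def gridF (m : List (List Int)) : Finset (Int × Int) :=
  (Finset.range m.length ×ˢ Finset.range (m.headD []).length).image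
    (fun p => ((p.1 : Int), (p.2 : Int)))

lemma free_mem_gridF {m : List (List Int)} {r c : Int} (h : pvFree m r c = true) :
    (r, c) ∈ gridF m := by
  simp only [pvFree, Bool.and_eq_true, decide_eq_true_eq] at h
  obtain ⟨⟨⟨⟨h1, h2⟩, h3⟩, h4⟩, -⟩ := h
  simp only [gridF, Finset.mem_image, Finset.mem_product, Finset.mem_range]
  exact ⟨(r.toNat, c.toNat), ⟨by omega, by omega⟩, by simp; omega⟩

lemma card_gridF (m : List (List Int)) : (gridF m).card ≤ gridN m := by
  unfold gridF gridN
  exact le_trans Finset.card_image_le (by simp)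

-- number of distinct free cells in a visited list
def kfree (m : List (List Int)) (V : List (Int × Int)) : Nat :=
  (V.toFinset.filter (fun v => pvFree m v.1 v.2 = true)).card

lemma kfree_le (m : List (List Int)) (V : List (Int × Int)) : kfree m V ≤ gridN m := by
  refine le_trans (Finset.card_le_card ?_) (card_gridF m)
  intro v hv
  simp only [Finset.mem_filter, List.mem_toFinset] at hv
  have := free_mem_gridF (m := m) (r := v.1) (c := v.2) hv.2
  simpa using this

lemma kfree_mono {m : List (List Int)} {V V' : List (Int × Int)} (h : V ⊆ V') :
    kfree m V ≤ kfree m V' := by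
  apply Finset.card_le_card
  intro x hx
  simp only [Finset.mem_filter, List.mem_toFinset] at *
  exact ⟨h hx.1, hx.2⟩

lemma kfree_add_of_fresh {m : List (List Int)} {V : List (Int × Int)} {v : Int × Int}
    (hv : v ∉ V) (hf : pvFree m v.1 v.2 = true) :
    kfree m (V ++ [v]) = kfree m V + 1 := by
  unfold kfree
  rw [List.toFinset_append, List.toFinset_cons, List.toFinset_nil, insert_empty_eq,
    Finset.union_comm, Finset.singleton_union, Finset.filter_insert, if_pos hf,
    Finset.card_insert_of_notMem (by simp [hv])]

-- "failed-closed except pending obligations E": target unvisited, every free neighbour of a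
-- visited cell is visited or still owed by E
def pvClosedE (m : List (List Int)) (t : Int × Int) (V : List (Int × Int))
    (E : (Int × Int) → (Int × Int) → Prop) : Prop :=
  t ∉ V ∧ ∀ v ∈ V, ∀ d ∈ pvDirs, pvFree m (v.1 + d.1) (v.2 + d.2) = true →
    (v.1 + d.1, v.2 + d.2) ∈ V ∨ E v d

-- completeness statement for dfsA at a given fuel
def AStmt (m : List (List Int)) (t : Int × Int) (fuel : Nat) : Prop :=
  ∀ (s : Int × Int) (V V' : List (Int × Int)) (E : (Int × Int) → (Int × Int) → Prop),
    gridN m + 1 ≤ fuel + kfree m (PySem.Set.add V s) →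
    pvClosedE m t V E →
    dfsA m t fuel s V = (false, V') →
    V ⊆ V' ∧ s ∈ V' ∧ pvClosedE m t V' E ∧
      ∀ d ∈ pvDirs, pvFree m (s.1 + d.1) (s.2 + d.2) = true → (s.1 + d.1, s.2 + d.2) ∈ V'

def LStmt (m : List (List Int)) (t : Int × Int) (fuel : Nat) : Prop :=
  ∀ (ds : List (Int × Int)) (row col : Int) (V V' : List (Int × Int))
    (E : (Int × Int) → (Int × Int) → Prop),
    gridN m + 1 ≤ (fuel + 1) + kfree m V →
    pvClosedE m t V (fun v d => E v d ∨ (v = (row, col) ∧ d ∈ ds)) →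
    dfsLoop m t fuel row col ds V = (false, V') →
    V ⊆ V' ∧ pvClosedE m t V' E ∧
      ∀ d ∈ ds, pvFree m (row + d.1) (col + d.2) = true → (row + d.1, col + d.2) ∈ V'

lemma valid_iff (m : List (List Int)) (r c : Int) (vis : PySem.Set (Int × Int)) :
    is_valid_move m r c vis = true ↔ (pvFree m r c = true ∧ (r, c) ∉ vis) := by
  simp [is_valid_move, pvFree, and_assoc]

lemma loop_false {m : List (List Int)} {t : Int × Int} {fuel : Nat}
    (ih : AStmt m t fuel) : LStmt m t fuel := by
  intro ds
  induction ds with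
  | nil =>
      intro row col V V' E hf hc h
      simp only [dfsLoop, Prod.mk.injEq] at h
      refine ⟨h.2 ▸ List.Subset.refl V, ⟨h.2 ▸ hc.1, ?_⟩, by simp⟩
      intro v hv d hd hfree
      rcases hc.2 v (h.2 ▸ hv) d hd hfree with h1 | h1 | h1
      · exact Or.inl (h.2 ▸ h1)
      · exact Or.inr h1
      · simp at h1
  | cons d rest ihds =>
      intro row col V V' E hf hc h
      simp only [dfsLoop] at h
      by_cases hv : is_valid_move m (row + d.1) (col + d.2) V = true
      · rw [if_pos hv] at h
        obtain ⟨hfree, hnot⟩ := (valid_iff m (row + d.1) (col + d.2) V).mp hv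
        cases hA : dfsA m t fuel (row + d.1, col + d.2) V with
        | mk b v1 =>
          cases b with
          | true => rw [hA] at h; simp at h
          | false =>
              rw [hA] at h
              have hadd : PySem.Set.add V (row + d.1, col + d.2) = V ++ [(row + d.1, col + d.2)] :=
                PySem.Set.add_of_not_mem hnot
              have hfA : gridN m + 1 ≤ fuel + kfree m (PySem.Set.add V (row + d.1, col + d.2)) := by
                rw [hadd, kfree_add_of_fresh hnot hfree]; omega
              obtain ⟨hVv1, hnv1, hcv1, -⟩ :=
                ih (row + d.1, col + d.2) V v1
                  (fun v d' => E v d' ∨ (v = (row, col) ∧ d' ∈ d :: rest)) hfA hc hA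
              have hf2 : gridN m + 1 ≤ (fuel + 1) + kfree m v1 := by
                have := kfree_mono (m := m) hVv1; omega
              have hc2 : pvClosedE m t v1
                  (fun v d' => E v d' ∨ (v = (row, col) ∧ d' ∈ rest)) := by
                refine ⟨hcv1.1, ?_⟩
                intro v hvv d' hd' hfree'
                rcases hcv1.2 v hvv d' hd' hfree' with h1 | h1 | ⟨rfl, h2⟩
                · exact Or.inl h1
                · exact Or.inr (Or.inl h1)
                · rcases List.mem_cons.mp h2 with rfl | h3
                  · exact Or.inl hnv1
                  · exact Or.inr (Or.inr ⟨rfl, h3⟩)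
              obtain ⟨hv1V', hcV', hrest⟩ := ihds row col v1 V' E hf2 hc2 h
              refine ⟨fun x hx => hv1V' (hVv1 hx), hcV', ?_⟩
              intro d' hd' hfree'
              rcases List.mem_cons.mp hd' with rfl | h3
              · exact hv1V' hnv1
              · exact hrest d' h3 hfree'
      · rw [if_neg hv] at h
        have hmem : pvFree m (row + d.1) (col + d.2) = true → (row + d.1, col + d.2) ∈ V := by
          intro hfree
          by_contra hnm
          exact hv ((valid_iff m (row + d.1) (col + d.2) V).mpr ⟨hfree, hnm⟩)
        have hc2 : pvClosedE m t V
            (fun v d' => E v d' ∨ (v = (row, col) ∧ d' ∈ rest)) := by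
          refine ⟨hc.1, ?_⟩
          intro v hvv d' hd' hfree'
          rcases hc.2 v hvv d' hd' hfree' with h1 | h1 | ⟨rfl, h2⟩
          · exact Or.inl h1
          · exact Or.inr (Or.inl h1)
          · rcases List.mem_cons.mp h2 with rfl | h3
            · exact Or.inl (hmem hfree')
            · exact Or.inr (Or.inr ⟨rfl, h3⟩)
        obtain ⟨hVV', hcV', hrest⟩ := ihds row col V V' E hf hc2 h
        refine ⟨hVV', hcV', ?_⟩
        intro d' hd' hfree'
        rcases List.mem_cons.mp hd' with rfl | h3
        · exact hVV' (hmem hfree')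
        · exact hrest d' h3 hfree'

lemma dfs_false {m : List (List Int)} {t : Int × Int} : ∀ fuel, AStmt m t fuel := by
  intro fuel
  induction fuel with
  | zero =>
      intro s V V' E hf hc h
      have := kfree_le m (PySem.Set.add V s)
      omega
  | succ fuel ih =>
      intro s V V' E hf hc h
      simp only [dfsA] at h
      by_cases hst : s = t
      · rw [if_pos hst] at h; simp at h
      · rw [if_neg hst] at h
        have hc' : pvClosedE m t (PySem.Set.add V s)
            (fun v d => E v d ∨ (v = (s.1, s.2) ∧ d ∈ pvDirs)) := by
          constructor
          · intro ht
            rcases (PySem.Set.mem_add _ _ _).mp ht with h1 | h1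
            · exact hc.1 h1
            · exact hst h1.symm
          · intro v hvv d hd hfree
            rcases (PySem.Set.mem_add _ _ _).mp hvv with h1 | rfl
            · rcases hc.2 v h1 d hd hfree with h2 | h2
              · exact Or.inl ((PySem.Set.mem_add _ _ _).mpr (Or.inl h2))
              · exact Or.inr (Or.inl h2)
            · exact Or.inr (Or.inr ⟨rfl, hd⟩)
        obtain ⟨hsub, hcV', hnbrs⟩ :=
          loop_false ih pvDirs s.1 s.2 (PySem.Set.add V s) V' E hf hc' h
        exact ⟨fun x hx => hsub ((PySem.Set.mem_add _ _ _).mpr (Or.inl hx)),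
          hsub ((PySem.Set.mem_add _ _ _).mpr (Or.inr rfl)), hcV', hnbrs⟩

-- soundness: a true answer exhibits the target or a free-reaching neighbour
lemma loop_true {m : List (List Int)} {t : Int × Int} {fuel : Nat}
    (ih : ∀ (s : Int × Int) (V V' : List (Int × Int)),
      dfsA m t fuel s V = (true, V') →
      s = t ∨ ∃ d ∈ pvDirs, pvRF m t (s.1 + d.1, s.2 + d.2)) :
    ∀ (ds : List (Int × Int)) (row col : Int) (V V' : List (Int × Int)),
      dfsLoop m t fuel row col ds V = (true, V') →
      ∃ d ∈ ds, pvRF m t (row + d.1, col + d.2) := by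
  intro ds
  induction ds with
  | nil => intro row col V V' h; simp [dfsLoop] at h
  | cons d rest ihds =>
      intro row col V V' h
      simp only [dfsLoop] at h
      by_cases hv : is_valid_move m (row + d.1) (col + d.2) V = true
      · rw [if_pos hv] at h
        have hfree := ((valid_iff m (row + d.1) (col + d.2) V).mp hv).1
        cases hA : dfsA m t fuel (row + d.1, col + d.2) V with
        | mk b v' =>
          cases b with
          | true =>
              rcases ih _ _ _ hA with hn | ⟨d', hd', hRF⟩
              · exact ⟨d, List.mem_cons_self .., by
                  have : pvRF m t t := pvRF.base (by rw [← hn]; exact hfree)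
                  rw [hn]; exact this⟩
              · exact ⟨d, List.mem_cons_self .., pvRF.step _ d' hfree hd' hRF⟩
          | false =>
              rw [hA] at h
              rcases ihds row col v' V' h with ⟨d', hd', hRF⟩
              exact ⟨d', List.mem_cons_of_mem _ hd', hRF⟩
      · rw [if_neg hv] at h
        rcases ihds row col V V' h with ⟨d', hd', hRF⟩
        exact ⟨d', List.mem_cons_of_mem _ hd', hRF⟩

lemma dfs_true {m : List (List Int)} {t : Int × Int} :
    ∀ (fuel : Nat) (s : Int × Int) (V V' : List (Int × Int)),
      dfsA m t fuel s V = (true, V') →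
      s = t ∨ ∃ d ∈ pvDirs, pvRF m t (s.1 + d.1, s.2 + d.2) := by
  intro fuel
  induction fuel with
  | zero => intro s V V' h; simp [dfsA] at h
  | succ fuel ih =>
      intro s V V' h
      simp only [dfsA] at h
      by_cases hst : s = t
      · exact Or.inl hst
      · rw [if_neg hst] at h
        exact Or.inr (loop_true ih pvDirs s.1 s.2 _ _ h)

-- a closed failed set with no pending obligations cannot contain a reaching cell
lemma rf_not_closed {m : List (List Int)} {t : Int × Int} {V : List (Int × Int)}
    (hc : pvClosedE m t V (fun _ _ => False)) :
    ∀ v, pvRF m t v → v ∉ V := by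
  intro v h
  induction h with
  | base hf => exact hc.1
  | step v d hfree hd hRF ih =>
      intro hv
      have hfn : pvFree m (v.1 + d.1) (v.2 + d.2) = true := pvRF_free hRF
      rcases hc.2 v hv d hd hfn with h1 | h1
      · exact ih h1
      · exact h1

-- ===== BFS side =====

lemma card_append_fresh {V : List (Int × Int)} {v : Int × Int} (hv : v ∉ V) :
    (V ++ [v]).toFinset.card = V.toFinset.card + 1 := by
  rw [List.toFinset_append, List.toFinset_cons, List.toFinset_nil, insert_empty_eq,
    Finset.union_comm, Finset.singleton_union,
    Finset.card_insert_of_notMem (by simp [hv])]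

lemma scan_spec {m : List (List Int)} {t : Int × Int} {r c : Int} :
    ∀ (ds : List (Int × Int)) (q comp : List (Int × Int)),
      ds ⊆ pvDirs → pvRF m t (r, c) →
      (bfsScan m r c ds q comp).2.toFinset.card + q.length =
        comp.toFinset.card + (bfsScan m r c ds q comp).1.length ∧
      comp ⊆ (bfsScan m r c ds q comp).2 ∧
      (∀ v ∈ (bfsScan m r c ds q comp).2,
        v ∈ comp ∨ (pvFree m v.1 v.2 = true ∧ pvRF m t v)) ∧
      (∀ v ∈ (bfsScan m r c ds q comp).2, v ∈ comp ∨ v ∈ (bfsScan m r c ds q comp).1) ∧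
      (∀ v ∈ (bfsScan m r c ds q comp).1, v ∈ q ∨ v ∈ (bfsScan m r c ds q comp).2) ∧
      (∀ d ∈ ds, pvFree m (r + d.1) (c + d.2) = true →
        (r + d.1, c + d.2) ∈ (bfsScan m r c ds q comp).2) ∧
      q ⊆ (bfsScan m r c ds q comp).1 := by
  intro ds
  induction ds with
  | nil =>
      intro q comp hds hrc
      simp only [bfsScan]
      exact ⟨trivial, List.Subset.refl _, fun v hv => Or.inl hv, fun v hv => Or.inl hv,
        fun v hv => Or.inl hv, by simp, List.Subset.refl _⟩
  | cons d rest ihds =>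
      intro q comp hds hrc
      have hd : d ∈ pvDirs := hds (List.mem_cons_self ..)
      have hrest : rest ⊆ pvDirs := fun x hx => hds (List.mem_cons_of_mem _ hx)
      simp only [bfsScan]
      by_cases hcond : (pvFree m (r + d.1) (c + d.2) &&
          !(PySem.Set.contains comp (r + d.1, c + d.2))) = true
      · rw [if_pos hcond]
        simp only [Bool.and_eq_true, Bool.not_eq_eq_eq_not, Bool.not_true,
          ← Bool.not_eq_true, PySem.Set.contains_iff] at hcond
        obtain ⟨hfree, hnm⟩ := hcond
        have hnRF : pvRF m t (r + d.1, c + d.2) := by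
          refine pvRF.step _ (-d.1, -d.2) hfree (pvDirs_neg d hd) ?_
          have he : pvNb (r + d.1, c + d.2) (-d.1, -d.2) = (r, c) := by
            simp only [pvNb, Prod.mk.injEq]; constructor <;> ring
          rw [he]; exact hrc
        have hadd : PySem.Set.add comp (r + d.1, c + d.2) = comp ++ [(r + d.1, c + d.2)] :=
          PySem.Set.add_of_not_mem hnm
        obtain ⟨ih1, ih2, ih3, ih4, ih5, ih6, ih7⟩ :=
          ihds (q ++ [(r + d.1, c + d.2)]) (PySem.Set.add comp (r + d.1, c + d.2)) hrest hrc
        have hsub2 : comp ⊆ (bfsScan m r c rest (q ++ [(r + d.1, c + d.2)])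
            (PySem.Set.add comp (r + d.1, c + d.2))).2 :=
          fun x hx => ih2 ((PySem.Set.mem_add _ _ _).mpr (Or.inl hx))
        have hnin2 : (r + d.1, c + d.2) ∈ (bfsScan m r c rest (q ++ [(r + d.1, c + d.2)])
            (PySem.Set.add comp (r + d.1, c + d.2))).2 :=
          ih2 ((PySem.Set.mem_add _ _ _).mpr (Or.inr rfl))
        refine ⟨?_, hsub2, ?_, ?_, ?_, ?_, ?_⟩
        · have hc1 : (PySem.Set.add comp (r + d.1, c + d.2)).toFinset.card =
              comp.toFinset.card + 1 := by rw [hadd]; exact card_append_fresh hnm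
          simp only [List.length_append, List.length_cons, List.length_nil] at ih1
          omega
        · intro v hv
          rcases ih3 v hv with h1 | h1
          · rcases (PySem.Set.mem_add _ _ _).mp h1 with h2 | rfl
            · exact Or.inl h2
            · exact Or.inr ⟨hfree, hnRF⟩
          · exact Or.inr h1
        · intro v hv
          rcases ih4 v hv with h1 | h1
          · rcases (PySem.Set.mem_add _ _ _).mp h1 with h2 | rfl
            · exact Or.inl h2
            · exact Or.inr (ih7 (by simp))
          · exact Or.inr h1
        · intro v hv
          rcases ih5 v hv with h1 | h1
          · rcases List.mem_append.mp h1 with h2 | h2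
            · exact Or.inl h2
            · simp only [List.mem_singleton] at h2
              exact Or.inr (h2 ▸ hnin2)
          · exact Or.inr h1
        · intro d' hd' hfree'
          rcases List.mem_cons.mp hd' with rfl | h3
          · exact hnin2
          · exact ih6 d' h3 hfree'
        · exact fun x hx => ih7 (List.mem_append.mpr (Or.inl hx))
      · rw [if_neg hcond]
        simp only [Bool.and_eq_true, Bool.not_eq_eq_eq_not, Bool.not_true,
          ← Bool.not_eq_true, PySem.Set.contains_iff, not_and, not_not] at hcond
        obtain ⟨ih1, ih2, ih3, ih4, ih5, ih6, ih7⟩ := ihds q comp hrest hrc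
        refine ⟨ih1, ih2, ih3, ih4, ih5, ?_, ih7⟩
        intro d' hd' hfree'
        rcases List.mem_cons.mp hd' with rfl | h3
        · exact ih2 (hcond hfree')
        · exact ih6 d' h3 hfree' 

lemma comp_card_le {m : List (List Int)} {comp : List (Int × Int)}
    (h : ∀ v ∈ comp, pvFree m v.1 v.2 = true) : comp.toFinset.card ≤ gridN m := by
  refine le_trans (Finset.card_le_card ?_) (card_gridF m)
  intro v hv
  simp only [List.mem_toFinset] at hv
  simpa using free_mem_gridF (m := m) (r := v.1) (c := v.2) (h v hv)

lemma go_spec {m : List (List Int)} {t : Int × Int} :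
    ∀ (fuel : Nat) (q comp : List (Int × Int)),
      (∀ v ∈ q, v ∈ comp) →
      (∀ v ∈ comp, pvFree m v.1 v.2 = true ∧ pvRF m t v) →
      (∀ v ∈ comp, v ∈ q ∨
        ∀ d ∈ pvDirs, pvFree m (v.1 + d.1) (v.2 + d.2) = true →
          (v.1 + d.1, v.2 + d.2) ∈ comp) →
      q.length + gridN m ≤ fuel + comp.toFinset.card →
      comp ⊆ bfsGo m fuel q comp ∧
      (∀ v ∈ bfsGo m fuel q comp, pvFree m v.1 v.2 = true ∧ pvRF m t v) ∧
      (∀ v ∈ bfsGo m fuel q comp, ∀ d ∈ pvDirs,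
        pvFree m (v.1 + d.1) (v.2 + d.2) = true →
          (v.1 + d.1, v.2 + d.2) ∈ bfsGo m fuel q comp) := by
  intro fuel
  induction fuel with
  | zero =>
      intro q comp hq hs hp hf
      cases q with
      | nil =>
          simp only [bfsGo]
          exact ⟨List.Subset.refl _, hs, fun v hv => (hp v hv).resolve_left (by simp)⟩
      | cons p qs =>
          exfalso
          have := comp_card_le (m := m) (comp := comp) (fun v hv => (hs v hv).1)
          simp only [List.length_cons] at hf
          omega
  | succ fuel ih =>
      intro q comp hq hs hp hf
      cases q with
      | nil =>
          simp only [bfsGo]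
          exact ⟨List.Subset.refl _, hs, fun v hv => (hp v hv).resolve_left (by simp)⟩
      | cons p qs =>
          simp only [bfsGo]
          have hpc : p ∈ comp := hq p (List.mem_cons_self ..)
          have hpRF : pvRF m t (p.1, p.2) := by
            have := (hs p hpc).2; rwa [Prod.mk.eta]
          obtain ⟨sc1, sc2, sc3, sc4, sc5, sc6, sc7⟩ :=
            scan_spec (m := m) (t := t) (r := p.1) (c := p.2) pvDirs qs comp
              (List.Subset.refl _) hpRF
          set S := bfsScan m p.1 p.2 pvDirs qs comp with hS
          have hq' : ∀ v ∈ S.1, v ∈ S.2 := by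
            intro v hv
            rcases sc5 v hv with h1 | h1
            · exact sc2 (hq v (List.mem_cons_of_mem _ h1))
            · exact h1
          have hs' : ∀ v ∈ S.2, pvFree m v.1 v.2 = true ∧ pvRF m t v := by
            intro v hv
            rcases sc3 v hv with h1 | h1
            · exact hs v h1
            · exact h1
          have hp' : ∀ v ∈ S.2, v ∈ S.1 ∨
              ∀ d ∈ pvDirs, pvFree m (v.1 + d.1) (v.2 + d.2) = true →
                (v.1 + d.1, v.2 + d.2) ∈ S.2 := by
            intro v hv
            rcases sc4 v hv with h1 | h1
            · rcases hp v h1 with h2 | h2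
              · rcases List.mem_cons.mp h2 with rfl | h3
                · exact Or.inr (fun d hd hfree => sc6 d hd hfree)
                · exact Or.inl (sc7 h3)
              · exact Or.inr (fun d hd hfree => sc2 (h2 d hd hfree))
            · exact Or.inl h1
          have hf' : S.1.length + gridN m ≤ fuel + S.2.toFinset.card := by
            simp only [List.length_cons] at hf
            omega
          exact ih S.1 S.2 hq' hs' hp' hf' |>.imp
            (fun h => fun x hx => h (sc2 hx)) id

lemma targetComp_spec {m : List (List Int)} {t : Int × Int} :
    (∀ v ∈ targetComp m t, pvFree m v.1 v.2 = true ∧ pvRF m t v) ∧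
    (∀ v ∈ targetComp m t, ∀ d ∈ pvDirs,
      pvFree m (v.1 + d.1) (v.2 + d.2) = true → (v.1 + d.1, v.2 + d.2) ∈ targetComp m t) ∧
    (pvFree m t.1 t.2 = true → t ∈ targetComp m t) := by
  unfold targetComp
  by_cases hft : pvFree m t.1 t.2 = true
  · rw [if_pos hft]
    have hseed : PySem.Set.add PySem.Set.empty t = [t] := rfl
    rw [hseed]
    have hgo := go_spec (m := m) (t := t)
      (m.length * (m.headD []).length) [t] [t]
      (fun v hv => hv)
      (by
        intro v hv
        simp only [List.mem_singleton] at hv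
        subst hv
        exact ⟨hft, pvRF.base hft⟩)
      (fun v hv => Or.inl hv)
      (by simp [gridN]; omega)
    exact ⟨hgo.2.1, hgo.2.2, fun _ => hgo.1 (List.mem_singleton.mpr rfl)⟩
  · rw [if_neg hft]
    exact ⟨by simp [PySem.Set.empty], by simp [PySem.Set.empty], fun h => absurd h hft⟩

lemma rf_mem_targetComp {m : List (List Int)} {t v : Int × Int} (h : pvRF m t v) :
    v ∈ targetComp m t := by
  induction h with
  | base hf => exact targetComp_spec.2.2 hf
  | step v d hfree hd hRF ih =>
      have hcl := targetComp_spec.2.1 (pvNb v d) ih (-d.1, -d.2) (pvDirs_neg d hd)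
      have h1 : (pvNb v d).1 + (-d.1, -d.2).1 = v.1 := by simp only [pvNb]; ring
      have h2 : (pvNb v d).2 + (-d.1, -d.2).2 = v.2 := by simp only [pvNb]; ring
      rw [h1, h2, Prod.mk.eta] at hcl
      exact hcl hfree

-- ===== per-start equivalence and the top loops =====

lemma per_start (m : List (List Int)) (t s : Int × Int) :
    (dfsA m t (m.length * (m.headD []).length + 1) s PySem.Set.empty).1 =
      (decide (s = t) ||
        pvDirs.any (fun d => PySem.Set.contains (targetComp m t) (s.1 + d.1, s.2 + d.2))) := by
  cases hA : dfsA m t (m.length * (m.headD []).length + 1) s PySem.Set.empty with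
  | mk b V' =>
    cases b with
    | true =>
        simp only
        symm
        rcases dfs_true _ _ _ _ hA with rfl | ⟨d, hd, hRF⟩
        · simp
        · have hmem := rf_mem_targetComp hRF
          simp only [Bool.or_eq_true, List.any_eq_true, PySem.Set.contains_iff]
          exact Or.inr ⟨d, hd, hmem⟩
    | false =>
        simp only
        have hst : s ≠ t := by
          intro rfl
          simp only [dfsA] at hA
          simp at hA
        have hnone : ∀ d ∈ pvDirs, (s.1 + d.1, s.2 + d.2) ∉ targetComp m t := by
          intro d hd hmem
          have hfree := (targetComp_spec.1 _ hmem).1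
          have hRF := (targetComp_spec.1 _ hmem).2
          obtain ⟨-, -, hcV', hnbrs⟩ :=
            dfs_false (m := m) (t := t) (m.length * (m.headD []).length + 1) s
              PySem.Set.empty V' (fun _ _ => False)
              (Nat.le_add_right _ _)
              ⟨by simp [PySem.Set.empty], by simp [PySem.Set.empty]⟩ hA
          exact rf_not_closed hcV' _ hRF (hnbrs d hd hfree)
        have h1 : decide (s = t) = false := decide_eq_false hst
        have h2 : (pvDirs.any fun d =>
            PySem.Set.contains (targetComp m t) (s.1 + d.1, s.2 + d.2)) = false := by
          by_contra h
          rw [Bool.not_eq_false, List.any_eq_true] at h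
          obtain ⟨d, hd, hc⟩ := h
          exact hnone d hd ((PySem.Set.contains_iff _ _).mp hc)
        rw [h1, h2]
        rfl

lemma loops_eq (m : List (List Int)) (t : Int × Int) :
    ∀ (sp : List (Int × Int)) (count : Int),
      hfpLoopA m t (m.length * (m.headD []).length + 1) sp count =
        hfpLoopB t (targetComp m t) sp count := by
  intro sp
  induction sp with
  | nil => intro count; rfl
  | cons s rest ih =>
      intro count
      simp only [hfpLoopA, hfpLoopB, per_start m t s, ih]

-- ===== VERDICT (by name: the statement is the Claim_ definition above) =====
theorem has_feasible_path_spec : Claim_equal_has_feasible_path := by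
  intro matrix start_points target _ _
  unfold Spec_has_feasible_path has_feasible_path has_feasible_path_alt
  exact loops_eq matrix target start_points 0
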